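-- pv_equiv track=rewrite | github.com/Ciranjeevi-Dashnamoorthy/100-days-Leetcode | Day91/91.py | findRelativeRanks
-- ===== SOURCE A (Python) =====
-- from typing import List
--
-- def findRelativeRanks(score: List[int]) -> List[str]:
--     import heapq
--     heap=[]
--     for i in range(len(score)):
--         heapq.heappush(heap,(-score[i],i))
--
--     res=[""]*len(score)
--     rank=1
--     while heap:
--         s,index=heapq.heappop(heap)
--         if rank==1:
--             res[index]="Gold Medal"
--         elif rank==2:
--             res[index]="Silver Medal"
--         elif rank==3:
--             res[index]="Bronze Medal"
--         else:
--             res[index]=str(rank)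
--         rank+=1
--     return res
-- ===== SOURCE B (Python) =====
-- from typing import List
--
-- def findRelativeRanks(score: List[int]) -> List[str]:
--     medals = ["Gold Medal", "Silver Medal", "Bronze Medal"]
--     res = [""] * len(score)
--     rank = 1
--     for _, i in sorted((-s, j) for j, s in enumerate(score)):
--         res[i] = medals[rank - 1] if rank <= 3 else str(rank)
--         rank += 1
--     return res
-- ===== Notes on version B (the rewrite author's own statement) =====
-- stated objective: simpler
-- what changed: Replaces the maintained max-heap and repeated heappop loop with a single sort of (-score, index) pairs followed by one direct assignment pass with a rank counter and a medal lookup table.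
import Mathlib
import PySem

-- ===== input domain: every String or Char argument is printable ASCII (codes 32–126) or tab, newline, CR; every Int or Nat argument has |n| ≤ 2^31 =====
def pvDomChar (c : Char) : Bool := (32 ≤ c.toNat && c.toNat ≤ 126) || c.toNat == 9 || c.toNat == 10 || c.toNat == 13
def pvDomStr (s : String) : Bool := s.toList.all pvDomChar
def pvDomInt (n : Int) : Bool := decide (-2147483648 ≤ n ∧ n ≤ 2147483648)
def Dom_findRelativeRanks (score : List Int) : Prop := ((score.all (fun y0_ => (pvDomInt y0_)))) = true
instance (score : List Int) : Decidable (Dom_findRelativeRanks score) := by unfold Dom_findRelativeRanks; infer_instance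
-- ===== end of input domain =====

-- B replaces A's maintained heap and repeated heappop loop with one sort of the
-- (-score, index) pairs plus a single assignment pass (objective: simpler).

-- ===== PORT A =====
-- Python's comparison (a1, a2) <= (b1, b2) on int pairs, exactly (lexicographic).
def pvLexLe (a b : Int × Int) : Bool := decide (a.1 < b.1 ∨ (a.1 = b.1 ∧ a.2 ≤ b.2))

-- The heap is modelled as the list of pushed items; heappop extracts the
-- lexicographically smallest item (the first one on ties), which is exactly what
-- heapq.heappop returns here: the pushed pairs all have distinct second components,
-- so the smallest item is unique.
def pvHeapMin (x : Int × Int) (t : List (Int × Int)) : Int × Int :=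
  t.foldl (fun a b => if pvLexLe a b then a else b) x

-- membership fact needed by pvPopLoop's termination proof
theorem pvHeapMin_mem (t : List (Int × Int)) : ∀ x, pvHeapMin x t ∈ x :: t := by
  induction t with
  | nil => intro x; simp [pvHeapMin]
  | cons y t ih =>
    intro x
    have h : pvHeapMin x (y :: t) = pvHeapMin (if pvLexLe x y then x else y) t := rfl
    rw [h]
    rcases List.mem_cons.1 (ih (if pvLexLe x y then x else y)) with h1 | h1
    · rw [h1]; by_cases hxy : pvLexLe x y <;> simp [hxy]
    · simp [h1]

-- the `while heap:` loop of A, step for step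
def pvPopLoop : List (Int × Int) → List String → Int → List String
  | [], res, _ => res
  | x :: t, res, rank =>
    let m := pvHeapMin x t
    let lbl : String :=
      if rank = 1 then "Gold Medal"
      else if rank = 2 then "Silver Medal"
      else if rank = 3 then "Bronze Medal"
      else PySem.Int.toStr rank
    pvPopLoop ((x :: t).erase m) (PySem.List.pySetD res m.2 lbl) (rank + 1)
  termination_by h _ _ => h.length
  decreasing_by
    simp only [List.length_erase_of_mem (pvHeapMin_mem t x), List.length_cons]; omega

def findRelativeRanks (score : List Int) : List String :=
  let heap := (PySem.List.pyRange 0 score.length 1).foldl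
    (fun h i => h ++ [(-(PySem.List.pyGetD score i 0), i)]) []
  let res := List.replicate score.length ""
  pvPopLoop heap res 1

-- ===== PORT B =====
def pvMedals : List String := ["Gold Medal", "Silver Medal", "Bronze Medal"]

def findRelativeRanks_alt (score : List Int) : List String :=
  let pairs := (PySem.List.enumerate score).map (fun p => (-p.2, p.1))
  -- sorted(pairs): Python compares int pairs lexicographically = the Lex order on Int × Int
  let sp := PySem.List.sorted pairs (fun p => (toLex p : Int ×ₗ Int)) false
  (sp.foldl
    (fun (st : List String × Int) p =>
      (PySem.List.pySetD st.1 p.2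
        (if st.2 ≤ 3 then (PySem.List.pyGet? pvMedals (st.2 - 1)).getD "" else PySem.Int.toStr st.2),
       st.2 + 1))
    (List.replicate score.length "", 1)).1

-- ===== PRECONDITION & SPEC =====
def Spec_findRelativeRanks (score : List Int) (out : List String) : Prop := out = findRelativeRanks_alt score
instance (score : List Int) (out : List String) : Decidable (Spec_findRelativeRanks score out) := by unfold Spec_findRelativeRanks; infer_instance

-- ===== CLAIM (what is proved, stated in full; the proofs are below) =====
def Claim_equal_findRelativeRanks : Prop := ∀ (score : List Int), Dom_findRelativeRanks score → Spec_findRelativeRanks score (findRelativeRanks score)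

-- ===== LEMMAS AND PROOFS =====

def pvLexLt (a b : Int × Int) : Prop := a.1 < b.1 ∨ (a.1 = b.1 ∧ a.2 < b.2)

theorem pvLexLe_lt_asymm {a b : Int × Int} (h1 : pvLexLe a b) (h2 : pvLexLt b a) : False := by
  simp [pvLexLe] at h1; simp [pvLexLt] at h2; omega

theorem pvLexLe_trans {a b c : Int × Int} (h1 : pvLexLe a b) (h2 : pvLexLe b c) : pvLexLe a c := by
  simp only [pvLexLe, decide_eq_true_iff] at h1 h2 ⊢; omega

theorem pvLexLe_of_not {x y : Int × Int} (h : ¬ pvLexLe x y) : pvLexLe y x := by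
  simp only [pvLexLe, decide_eq_true_iff] at h ⊢; omega

theorem pvHeapMin_le (t : List (Int × Int)) :
    ∀ x, ∀ z ∈ x :: t, pvLexLe (pvHeapMin x t) z := by
  induction t with
  | nil =>
    intro x z hz
    rw [List.mem_singleton] at hz; subst hz
    simp [pvHeapMin, pvLexLe]
  | cons y t ih =>
    intro x z hz
    have h : pvHeapMin x (y :: t) = pvHeapMin (if pvLexLe x y then x else y) t := rfl
    rw [h]
    have hmin : ∀ w ∈ (if pvLexLe x y then x else y) :: t,
        pvLexLe (pvHeapMin (if pvLexLe x y then x else y) t) w := ih _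
    have hhead := hmin _ (List.mem_cons_self ..)
    rcases List.mem_cons.1 hz with hzx | hz'
    · rw [hzx]
      by_cases hxy : pvLexLe x y
      · simpa [hxy] using hhead
      · rw [if_neg hxy] at hhead ⊢
        exact pvLexLe_trans hhead (pvLexLe_of_not hxy)
    · rcases List.mem_cons.1 hz' with hzy | hz''
      · rw [hzy]
        by_cases hxy : pvLexLe x y
        · rw [if_pos hxy] at hhead ⊢
          exact pvLexLe_trans hhead hxy
        · simpa [hxy] using hhead
      · exact hmin _ (List.mem_cons_of_mem _ hz'')

-- A's pop loop, run on any heap content, equals B's single pass over any strictly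
-- lex-increasing rearrangement of that content.
theorem pvMain (ys : List (Int × Int)) :
    ∀ (l : List (Int × Int)) (res : List String) (rank : Int),
    ys.Perm l → ys.Pairwise pvLexLt → 1 ≤ rank →
    pvPopLoop l res rank =
      (ys.foldl
        (fun (st : List String × Int) p =>
          (PySem.List.pySetD st.1 p.2
            (if st.2 ≤ 3 then (PySem.List.pyGet? pvMedals (st.2 - 1)).getD "" else PySem.Int.toStr st.2),
           st.2 + 1))
        (res, rank)).1 := by
  induction ys with
  | nil =>
    intro l res rank hperm _ _
    have : l = [] := hperm.symm.eq_nil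
    subst this
    rw [pvPopLoop]
    simp
  | cons m' ys' ih =>
    intro l res rank hperm hsort hrank
    cases l with
    | nil => exact absurd hperm.eq_nil (by simp)
    | cons x t =>
      have hmmem : pvHeapMin x t ∈ x :: t := pvHeapMin_mem t x
      have hmle : ∀ z ∈ x :: t, pvLexLe (pvHeapMin x t) z := pvHeapMin_le t x
      -- the heap minimum is the head of the sorted sequence
      have hm : pvHeapMin x t = m' := by
        by_contra hne
        have hmem' : pvHeapMin x t ∈ m' :: ys' := hperm.mem_iff.2 hmmem
        have h1 : pvHeapMin x t ∈ ys' := by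
          rcases List.mem_cons.1 hmem' with h | h
          · exact absurd h hne
          · exact h
        have h2 : pvLexLt m' (pvHeapMin x t) := (List.pairwise_cons.1 hsort).1 _ h1
        have h3 : pvLexLe (pvHeapMin x t) m' := hmle _ (hperm.mem_iff.1 (List.mem_cons_self ..))
        exact pvLexLe_lt_asymm h3 h2
      -- the two label computations agree for rank ≥ 1
      have hlbl :
          (if rank = 1 then "Gold Medal"
           else if rank = 2 then "Silver Medal"
           else if rank = 3 then "Bronze Medal"
           else PySem.Int.toStr rank)
          = (if rank ≤ 3 then (PySem.List.pyGet? pvMedals (rank - 1)).getD "" else PySem.Int.toStr rank) := by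
        by_cases h1 : rank = 1
        · subst h1; rfl
        · by_cases h2 : rank = 2
          · subst h2; rfl
          · by_cases h3 : rank = 3
            · subst h3; rfl
            · have : ¬ rank ≤ 3 := by omega
              simp [h1, h2, h3, this]
      have hperm' : ys'.Perm ((x :: t).erase m') := by
        have := hperm.erase m'
        rwa [List.erase_cons_head] at this
      have hstep := ih ((x :: t).erase m') (PySem.List.pySetD res m'.2
          (if rank ≤ 3 then (PySem.List.pyGet? pvMedals (rank - 1)).getD "" else PySem.Int.toStr rank))
          (rank + 1) hperm' (List.pairwise_cons.1 hsort).2 (by omega)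
      calc pvPopLoop (x :: t) res rank
          = pvPopLoop ((x :: t).erase (pvHeapMin x t))
              (PySem.List.pySetD res (pvHeapMin x t).2
                (if rank = 1 then "Gold Medal"
                 else if rank = 2 then "Silver Medal"
                 else if rank = 3 then "Bronze Medal"
                 else PySem.Int.toStr rank)) (rank + 1) := by
            rw [pvPopLoop]
        _ = _ := by rw [hm, hlbl, hstep, List.foldl_cons]

-- the heap contents A pushes = the pair list B sorts
theorem pvHeap_eq_pairs (score : List Int) :
    (PySem.List.pyRange 0 score.length 1).foldl
        (fun h i => h ++ [(-(PySem.List.pyGetD score i 0), i)]) []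
      = (PySem.List.enumerate score).map (fun p => (-p.2, p.1)) := by
  rw [PySem.List.foldl_append_singleton_eq_map,
      PySem.List.enumerate_eq_map_pyRange score 0, List.map_map]
  rfl

-- the sorted pair list is strictly increasing in the lexicographic order
theorem pvSorted_pairwise (score : List Int) :
    (PySem.List.sorted ((PySem.List.enumerate score).map (fun p => (-p.2, p.1)))
       (fun p => (toLex p : Lex (Int × Int))) false).Pairwise pvLexLt := by
  set pairs := (PySem.List.enumerate score).map (fun p => (-p.2, p.1)) with hp
  set sp := PySem.List.sorted pairs (fun p => (toLex p : Lex (Int × Int))) false with hsp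
  have h1 : sp.Pairwise (fun a b => (toLex a : Lex (Int × Int)) ≤ toLex b) :=
    PySem.List.sorted_pairwise pairs _
  have hpairs : pairs.Pairwise (fun a b => a.2 ≠ b.2) := by
    rw [hp, List.pairwise_map]
    exact (PySem.List.pairwise_lt_enumerate score 0).imp (fun h => by omega)
  have h2 : sp.Pairwise (fun a b => a.2 ≠ b.2) := by
    have hsym : Symmetric (fun (a b : Int × Int) => a.2 ≠ b.2) := fun a b hh => Ne.symm hh
    exact (List.Perm.pairwise_iff @hsym (PySem.List.sorted_perm pairs _ false)).2 hpairs
  refine (h1.and h2).imp ?_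
  rintro a b ⟨hle, hne⟩
  rcases Prod.Lex.toLex_le_toLex.mp hle with h | ⟨h, h'⟩
  · exact Or.inl h
  · exact Or.inr ⟨h, lt_of_le_of_ne h' hne⟩

-- ===== VERDICT (by name: the statement is the Claim_ definition above) =====
theorem findRelativeRanks_spec : Claim_equal_findRelativeRanks := by
  intro score _
  unfold Spec_findRelativeRanks findRelativeRanks findRelativeRanks_alt
  simp only [pvHeap_eq_pairs]
  exact pvMain _ _ _ _ (PySem.List.sorted_perm _ _ _) (pvSorted_pairwise score) (by omega)
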